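-- pv_equiv track=rewrite | github.com/czaky/puzzles | arrays.py | kaiten_sushi
-- ===== SOURCE A (Python) =====
-- from collections import Counter, deque
--
-- def kaiten_sushi(belt: list[int], distance: int) -> int:
--     """Count dishes on the `belt` which are unique within the `distance`."""
--     dishes = set()
--     order = deque()
--     count = 0
--     for d in belt:
--         if d in dishes:
--             continue
--         count += 1
--         dishes.add(d)
--         order.append(d)
--         if len(dishes) > distance:
--             dishes.remove(order.popleft())
--     return count
-- ===== SOURCE B (Python) =====
-- def kaiten_sushi(belt: list[int], distance: int) -> int:
--     """Count dishes on the `belt` which are unique within the `distance`."""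
--     count = 0
--     last = {}
--     for d in belt:
--         t = last.get(d)
--         if t is not None and t > count - distance:
--             continue
--         count += 1
--         last[d] = count
--     return count
-- ===== Notes on version B (the rewrite author's own statement) =====
-- stated objective: alternative
-- what changed: Replaced the set+deque sliding window with explicit eviction by lazy timestamping: a dict maps each dish to the counter value at which it was last counted, and window membership becomes the arithmetic test last[d] > count - distance, so the deque and the eviction branch disappear.
import Mathlib
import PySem

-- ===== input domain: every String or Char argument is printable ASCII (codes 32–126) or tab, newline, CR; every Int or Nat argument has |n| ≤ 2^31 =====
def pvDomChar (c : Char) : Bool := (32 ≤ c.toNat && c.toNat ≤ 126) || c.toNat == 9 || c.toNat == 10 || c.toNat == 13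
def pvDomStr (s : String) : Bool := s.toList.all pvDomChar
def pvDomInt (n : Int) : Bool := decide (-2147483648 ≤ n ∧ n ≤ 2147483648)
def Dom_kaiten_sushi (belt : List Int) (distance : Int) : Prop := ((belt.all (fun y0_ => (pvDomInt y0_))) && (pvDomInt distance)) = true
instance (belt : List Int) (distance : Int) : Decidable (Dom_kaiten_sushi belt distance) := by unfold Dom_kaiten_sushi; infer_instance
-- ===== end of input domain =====

-- B replaces A's set+deque window with lazy timestamping (a dict of last-counted indices and one
-- arithmetic comparison), removing the eviction step; objective: alternative (same O(n) cost).

-- ===== PORT A =====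
-- loop body of A: skip if seen in window, else count, record, and evict the oldest when over distance
def stepA (distance : Int) (st : PySem.Set Int × List Int × Int) (d : Int) :
    PySem.Set Int × List Int × Int :=
  if PySem.Set.contains st.1 d then st
  else
    let count := st.2.2 + 1
    let dishes := PySem.Set.add st.1 d
    let order := st.2.1 ++ [d]
    if distance < PySem.Set.len dishes then
      -- `order.popleft()`: the deque is nonempty here (d was just appended), so headD/tail are exact;
      -- `dishes.remove(popped)` never raises since the popped dish is in `dishes`, so discard is exact.
      (PySem.Set.discard dishes (order.headD 0), order.tail, count)
    else (dishes, order, count)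

def kaiten_sushi (belt : List Int) (distance : Int) : Int :=
  (belt.foldl (stepA distance) ((PySem.Set.empty : PySem.Set Int), ([] : List Int), (0 : Int))).2.2

-- ===== PORT B =====
-- loop body of B: skip if the dish's last counted timestamp is still within `distance` counts
def stepB (distance : Int) (st : Int × PySem.Dict Int Int) (d : Int) : Int × PySem.Dict Int Int :=
  match PySem.Dict.get? st.2 d with
  | some t =>
      if t > st.1 - distance then st
      else (st.1 + 1, PySem.Dict.insert st.2 d (st.1 + 1))
  | none => (st.1 + 1, PySem.Dict.insert st.2 d (st.1 + 1))

def kaiten_sushi_alt (belt : List Int) (distance : Int) : Int :=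
  (belt.foldl (stepB distance) ((0 : Int), (PySem.Dict.empty : PySem.Dict Int Int))).1

-- ===== PRECONDITION & SPEC =====
def Spec_kaiten_sushi (belt : List Int) (distance : Int) (out : Int) : Prop := out = kaiten_sushi_alt belt distance
instance (belt : List Int) (distance : Int) (out : Int) : Decidable (Spec_kaiten_sushi belt distance out) := by unfold Spec_kaiten_sushi; infer_instance

-- ===== CLAIM (what is proved, stated in full; the proofs are below) =====
def Claim_equal_kaiten_sushi : Prop := ∀ (belt : List Int) (distance : Int), Dom_kaiten_sushi belt distance → Spec_kaiten_sushi belt distance (kaiten_sushi belt distance)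

-- ===== LEMMAS AND PROOFS =====

-- Invariant tying A's window (`order`, whose set of dishes is exactly A's `dishes`) to B's
-- timestamp dict `last` at a common counter value `count`.
def InvAB (distance : Int) (order : List Int) (count : Int) (last : PySem.Dict Int Int) : Prop :=
  0 ≤ count ∧
  order.Nodup ∧
  (order.length : Int) = min count (max distance 0) ∧
  (∀ (i : Nat) (h : i < order.length),
      last.get? order[i] = some (count - (order.length : Int) + 1 + (i : Int))) ∧
  (∀ e t, last.get? e = some t → 1 ≤ t ∧ t ≤ count) ∧
  (∀ e, e ∉ order → ∀ t, last.get? e = some t → t ≤ count - (order.length : Int))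

lemma fold_eq (distance : Int) (belt : List Int) :
    ∀ (order : List Int) (count : Int) (last : PySem.Dict Int Int),
      InvAB distance order count last →
      (belt.foldl (stepA distance) ((order : PySem.Set Int), order, count)).2.2
        = (belt.foldl (stepB distance) ((count : Int), last)).1 := by
  induction belt with
  | nil => intro order count last _; simp
  | cons d belt ih =>
    intro order count last hInv
    obtain ⟨hc0, hnd, hlen, hwin, hbound, hout⟩ := hInv
    by_cases hd : d ∈ order
    · -- d is in the window: both sides skip
      have hA : stepA distance ((order : PySem.Set Int), order, count) d
          = ((order : PySem.Set Int), order, count) := by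
        simp only [stepA]
        rw [if_pos (by simpa using hd)]
      obtain ⟨i, hi, hie⟩ := List.mem_iff_getElem.mp hd
      have hget : last.get? d = some (count - (order.length : Int) + 1 + (i : Int)) := by
        rw [← hie]; exact hwin i hi
      have hgt : count - (order.length : Int) + 1 + (i : Int) > count - distance := by
        have hi' : (i : Int) < (order.length : Int) := by exact_mod_cast hi
        omega
      have hB : stepB distance ((count : Int), last) d = ((count : Int), last) := by
        simp [stepB, hget, hgt]
      rw [List.foldl_cons, List.foldl_cons, hA, hB]
      exact ih order count last ⟨hc0, hnd, hlen, hwin, hbound, hout⟩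
    · -- d is not in the window: both sides count it
      have hadd : PySem.Set.add (order : PySem.Set Int) d = order ++ [d] :=
        PySem.Set.add_of_not_mem hd
      -- B takes the counting branch
      have hB : stepB distance ((count : Int), last) d
          = (count + 1, last.insert d (count + 1)) := by
        cases hg : last.get? d with
        | none => simp [stepB, hg]
        | some t =>
          have h1 := hbound d t hg
          have h2 := hout d hd t hg
          have hle : ¬ (t > count - distance) := by omega
          simp [stepB, hg, hle]
      rw [List.foldl_cons, List.foldl_cons, hB]
      -- new dict invariant facts
      have hbound' : ∀ e t, (last.insert d (count + 1)).get? e = some t →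
          1 ≤ t ∧ t ≤ count + 1 := by
        intro e t hg
        rw [PySem.Dict.get?_insert] at hg
        by_cases he : e = d
        · simp [he] at hg; omega
        · simp [he] at hg; have := hbound e t hg; omega
      by_cases hev : distance < PySem.Set.len ((order ++ [d] : List Int) : PySem.Set Int)
      · -- eviction branch
        have hlenS : PySem.Set.len ((order ++ [d] : List Int) : PySem.Set Int)
            = (order.length : Int) + 1 := by
          simp [PySem.Set.len]
        cases order with
        | nil =>
          -- window was empty: the just-added dish is evicted immediately (distance ≤ 0)
          have hev1 : distance < 1 := by simpa [PySem.Set.len] using hev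
          have hA : stepA distance (([] : PySem.Set Int), [], count) d
              = (([] : PySem.Set Int), [], count + 1) := by
            simp [stepA, PySem.Set.add, PySem.Set.discard, PySem.Set.len, hev1]
          rw [hA]
          apply ih [] (count + 1) (last.insert d (count + 1))
          refine ⟨by omega, List.nodup_nil, ?_, ?_, hbound', ?_⟩
          · simp only [List.length_nil, Nat.cast_zero]
            omega
          · intro i hi
            exact absurd hi (Nat.not_lt_zero i)
          · intro e _ t hg
            have := hbound' e t hg
            simp only [List.length_nil, Nat.cast_zero]
            omega
        | cons h tl =>
          have hdh : d ≠ h := by intro he; exact hd (he ▸ List.mem_cons_self ..)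
          have hhtl : h ∉ tl := (List.nodup_cons.mp hnd).1
          have hdis : PySem.Set.discard (((h :: tl) ++ [d] : List Int) : PySem.Set Int) h
              = tl ++ [d] := by
            simp only [PySem.Set.discard, List.cons_append, List.filter_cons]
            rw [if_neg (by simp)]
            rw [List.filter_eq_self.mpr]
            intro a ha
            simp only [List.mem_append, List.mem_singleton] at ha
            simp only [Bool.not_eq_eq_eq_not, Bool.not_true, beq_eq_false_iff_ne, ne_eq]
            rcases ha with ha | ha
            · intro he; exact hhtl (he ▸ ha)
            · intro he; exact hdh (by rw [← ha]; exact he)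
          have hA : stepA distance (((h :: tl : List Int) : PySem.Set Int), h :: tl, count) d
              = ((tl ++ [d] : List Int), tl ++ [d], count + 1) := by
            simp only [stepA, hadd]
            rw [if_neg (by simpa using hd)]
            rw [if_pos hev]
            simp only [List.cons_append, List.headD_cons, List.tail_cons]
            rw [show (h :: (tl ++ [d]) : List Int) = (h :: tl) ++ [d] from rfl] at *
            rw [hdis]
          rw [hA]
          apply ih (tl ++ [d]) (count + 1) (last.insert d (count + 1))
          have hn : ((h :: tl).length : Int) = (tl.length : Int) + 1 := by simp
          have hndtl : (tl ++ [d]).Nodup := by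
            have := List.nodup_cons.mp hnd
            refine List.nodup_append.mpr ⟨this.2, List.nodup_singleton d, ?_⟩
            intro a ha b hb
            rw [List.mem_singleton] at hb
            subst hb
            intro he
            exact hd (he ▸ List.mem_cons_of_mem h ha)
          refine ⟨by omega, hndtl, ?_, ?_, hbound', ?_⟩
          · rw [hlenS, hn] at hev
            simp only [List.length_append, List.length_cons, List.length_nil] at hlen ⊢
            push_cast at hlen ⊢
            omega
          · intro i hi
            have hi' : i < tl.length + 1 := by simpa using hi
            rw [PySem.Dict.get?_insert]
            by_cases hitl : i < tl.length
            · rw [List.getElem_append_left hitl]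
              have hne : tl[i] ≠ d := by
                intro he; exact hd (he ▸ List.mem_cons_of_mem h (List.getElem_mem hitl))
              rw [if_neg hne]
              have := hwin (i + 1) (by simpa using Nat.succ_lt_succ hitl)
              simp only [List.getElem_cons_succ] at this
              rw [this]
              congr 1
              simp only [List.length_append, List.length_cons, List.length_nil]
              push_cast
              omega
            · have hieq : i = tl.length := by omega
              subst hieq
              rw [List.getElem_append_right (Nat.le_refl _)]
              simp only [Nat.sub_self, List.getElem_singleton]
              simp only [if_true]
              have hl : (((tl ++ [d]).length : Nat) : Int) = (tl.length : Int) + 1 := by simp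
              rw [hl]
              congr 1
              omega
          · intro e he t hg
            have hed : e ≠ d := by intro h'; exact he (h' ▸ List.mem_append_right _ (List.mem_singleton.mpr rfl))
            rw [PySem.Dict.get?_insert, if_neg hed] at hg
            simp only [List.length_append, List.length_cons, List.length_nil]
            by_cases heh : e = h
            · have := hwin 0 (by simp)
              simp only [List.getElem_cons_zero] at this
              rw [heh, this] at hg
              have hg' := Option.some_inj.mp hg
              simp only [List.length_cons] at hg' ⊢
              push_cast at hg' ⊢
              omega
            · have hetl : e ∉ h :: tl := by
                intro hmem
                rcases List.mem_cons.mp hmem with h' | h'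
                · exact heh h'
                · exact he (List.mem_append_left _ h')
              have := hout e hetl t hg
              simp only [List.length_cons] at this
              push_cast at this ⊢
              omega
      · -- no eviction: window just grows
        have hA : stepA distance ((order : PySem.Set Int), order, count) d
            = ((order ++ [d] : List Int), order ++ [d], count + 1) := by
          simp only [stepA, hadd]
          rw [if_neg (by simpa using hd)]
          rw [if_neg hev]
        rw [hA]
        apply ih (order ++ [d]) (count + 1) (last.insert d (count + 1))
        have hlenS : PySem.Set.len ((order ++ [d] : List Int) : PySem.Set Int)
            = (order.length : Int) + 1 := by simp [PySem.Set.len]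
        rw [hlenS] at hev
        have hndo : (order ++ [d]).Nodup := by
          refine List.nodup_append.mpr ⟨hnd, List.nodup_singleton d, ?_⟩
          intro a ha b hb
          rw [List.mem_singleton] at hb
          subst hb
          intro he
          exact hd (he ▸ ha)
        refine ⟨by omega, hndo, ?_, ?_, hbound', ?_⟩
        · simp only [List.length_append, List.length_cons, List.length_nil]
          push_cast
          omega
        · intro i hi
          have hi' : i < order.length + 1 := by simpa using hi
          rw [PySem.Dict.get?_insert]
          by_cases hio : i < order.length
          · rw [List.getElem_append_left hio]
            have hne : order[i] ≠ d := by
              intro he; exact hd (he ▸ List.getElem_mem hio)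
            rw [if_neg hne, hwin i hio]
            congr 1
            simp only [List.length_append, List.length_cons, List.length_nil]
            push_cast
            omega
          · have hieq : i = order.length := by omega
            subst hieq
            rw [List.getElem_append_right (Nat.le_refl _)]
            simp only [Nat.sub_self, List.getElem_singleton]
            simp only [if_true]
            have hl : (((order ++ [d]).length : Nat) : Int) = (order.length : Int) + 1 := by simp
            rw [hl]
            congr 1
            omega
        · intro e he t hg
          have hed : e ≠ d := by intro h'; exact he (h' ▸ List.mem_append_right _ (List.mem_singleton.mpr rfl))
          have heo : e ∉ order := fun h' => he (List.mem_append_left _ h')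
          rw [PySem.Dict.get?_insert, if_neg hed] at hg
          have := hout e heo t hg
          simp only [List.length_append, List.length_cons, List.length_nil]
          push_cast at this ⊢
          omega

-- ===== VERDICT (by name: the statement is the Claim_ definition above) =====
theorem kaiten_sushi_spec : Claim_equal_kaiten_sushi := by
  intro belt distance _
  unfold Spec_kaiten_sushi kaiten_sushi kaiten_sushi_alt
  exact fold_eq distance belt [] 0 PySem.Dict.empty
    ⟨le_refl 0, List.nodup_nil, by simp only [List.length_nil, Nat.cast_zero]; omega,
     by intro i hi; exact absurd hi (Nat.not_lt_zero i),
     by intro e t hg; simp [PySem.Dict.get?_empty] at hg,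
     by intro e _ t hg; simp [PySem.Dict.get?_empty] at hg⟩
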